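-- pv_equiv track=rewrite | github.com/BOTekram/FastFoodChain | FastFoodChain.py | restaurantFinder
-- ===== SOURCE A (Python) =====
-- def restaurantFinder(d, site_list):
--     """
--     Function description:
--     This function finds the maximum revenue possible by opening restaurants
--     at certain sites, obeying the constraint that no two restaurants can be within
--     'd' sites of each other.
--
--     Approach description:
--     Dynamic Programming is used to keep track of the maximum revenue for each site
--
--     :Input:
--         d: An integer representing the minimum distance between restaurants.
--         site_list: A list of integers where each integer represents the revenue at that site.
--
--     :Output, return or postcondition:
--         Returns a tuple containing the maximum revenue and the list of sites selected.
--
--     :Time complexity: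
--         O(N), where N is the length of site_list, representing the number of potential restaurant sites.
--
--     :Aux space complexity:
--         O(N), where N is the length of site_list, representing the number of potential restaurant sites.
--     """
--
--     # Number of sites
--     N = len(site_list)
--
--     # Initialize an array to store maximum revenue for each site
--     max_revenue = [0] * N
--
--     # Initialize an array to store the sites selected to achieve max revenue for each site
--     selected_sites_for_max_revenue = [[] for _ in range(N)]
--
--     # Iterate through each site
--     for i in range(N):
--         # Case 1: Don't open restaurant at this site
--         if i == 0:
--             case_1_revenue = 0 # No revenue
--             case_1_sites = [] # No sites selected
--         else:
--             case_1_revenue = max_revenue[i-1] # Max revenue at the previous site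
--             case_1_sites = selected_sites_for_max_revenue[i-1][:] # Copy the list of selected sites from the previous site
--
--         # Case 2: Open restaurant at this site
--         if i - d - 1 >= 0:
--             case_2_revenue = site_list[i] + max_revenue[i - d - 1] # Add the revenue at this site to the max revenue at the site d sites before this one
--             case_2_sites = selected_sites_for_max_revenue[i - d - 1] + [i+1] # Add this site to the list of selected sites
--         else:
--             case_2_revenue = site_list[i] # No previous site to consider
--             case_2_sites = [i+1] # Add this site to the list of selected sites
--
--         # Choose the better case
--         if case_1_revenue > case_2_revenue:
--             max_revenue[i] = case_1_revenue # Max revenue at this site is the same as the max revenue at the previous site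
--             selected_sites_for_max_revenue[i] = case_1_sites # List of selected sites is the same as the list of selected sites at the previous site
--         else:
--             max_revenue[i] = case_2_revenue # Max revenue at this site is the revenue at this site plus the max revenue at the site d sites before this one
--             selected_sites_for_max_revenue[i] = case_2_sites # List of selected sites is the list of selected sites at the site d sites before this one plus this site
--
--     return (max_revenue[-1], selected_sites_for_max_revenue[-1]) # Return the max revenue and the list of selected sites
-- ===== SOURCE B (Python) =====
-- def restaurantFinder(d, site_list):
--     # O(N) DP: store only revenues and take/skip back-pointers,
--     # reconstruct the chosen site list once at the end.
--     n = len(site_list)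
--     dp = [0] * n
--     take = [False] * n
--     for i in range(n):
--         skip = dp[i - 1] if i > 0 else 0
--         j = i - d - 1
--         tk = site_list[i] + (dp[j] if j >= 0 else 0)
--         if tk >= skip:
--             dp[i] = tk
--             take[i] = True
--         else:
--             dp[i] = skip
--     sites = []
--     i = n - 1
--     while i >= 0:
--         if take[i]:
--             sites.append(i + 1)
--             i = i - d - 1
--         else:
--             i = i - 1
--     sites.reverse()
--     return (dp[-1], sites)
-- ===== Notes on version B (the rewrite author's own statement) =====
-- stated objective: faster
-- what changed: Replaces A's per-site copies of whole selected-site lists (O(N^2)) with an O(N) DP keeping only revenues and take/skip back-pointers plus one reconstruction pass; Pre_ excludes the empty site_list (A raises IndexError on max_revenue[-1]) and negative d, outside the natural domain, where for d <= -2 A raises IndexError and for d = -1 A returns a value read from not-yet-computed DP cells while B's reconstruction loop diverges.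
-- outside the precondition, e.g. on restaurantFinder(-1, [5]): A returns (5, [1]), B does not finish within the time limit
import Mathlib
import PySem

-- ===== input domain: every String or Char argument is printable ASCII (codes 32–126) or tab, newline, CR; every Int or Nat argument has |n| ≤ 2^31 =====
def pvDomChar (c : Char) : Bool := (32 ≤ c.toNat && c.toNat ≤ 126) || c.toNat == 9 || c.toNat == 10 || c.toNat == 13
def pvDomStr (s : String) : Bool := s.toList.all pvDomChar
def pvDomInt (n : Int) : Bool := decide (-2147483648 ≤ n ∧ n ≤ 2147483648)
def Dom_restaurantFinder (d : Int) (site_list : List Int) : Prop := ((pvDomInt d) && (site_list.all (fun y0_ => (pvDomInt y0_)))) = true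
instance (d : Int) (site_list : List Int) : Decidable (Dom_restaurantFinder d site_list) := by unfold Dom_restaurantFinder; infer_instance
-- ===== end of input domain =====

-- B replaces A's per-site copies of whole selected-site lists (O(N^2)) by an O(N) DP with
-- take/skip back-pointers and a single reconstruction pass at the end; return values agree on Pre_.

-- ===== PORT A =====
-- A's arrays are filled strictly left to right, reading only already-filled cells (indices i-1
-- and i-d-1 ≤ i-1 on Pre_); the in-place arrays are represented as lists grown by one entry per
-- iteration.  `getD` defaults are hit only where Python raises IndexError (outside Pre_).
def pvStepA (d : Int) (site : List Int) (st : List Int × List (List Int)) (i : Nat) :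
    List Int × List (List Int) :=
  let mr := st.1
  let ss := st.2
  let case1r : Int := if i = 0 then 0 else mr.getD (i - 1) 0
  let case1s : List Int := if i = 0 then [] else ss.getD (i - 1) []
  let j : Int := (i : Int) - d - 1
  let case2r : Int := if 0 ≤ j then site.getD i 0 + mr.getD j.toNat 0 else site.getD i 0
  let case2s : List Int := if 0 ≤ j then ss.getD j.toNat [] ++ [(i : Int) + 1] else [(i : Int) + 1]
  if case2r < case1r then (mr ++ [case1r], ss ++ [case1s]) else (mr ++ [case2r], ss ++ [case2s])

def restaurantFinder (d : Int) (site_list : List Int) : Int × List Int :=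
  let N := site_list.length
  let st := (List.range N).foldl (pvStepA d site_list) ([], [])
  (st.1.getD (N - 1) 0, st.2.getD (N - 1) [])

-- ===== PORT B =====
def pvStepB (d : Int) (site : List Int) (st : List Int × List Bool) (i : Nat) :
    List Int × List Bool :=
  let dp := st.1
  let tk := st.2
  let skip : Int := if 0 < i then dp.getD (i - 1) 0 else 0
  let j : Int := (i : Int) - d - 1
  let takeRev : Int := site.getD i 0 + (if 0 ≤ j then dp.getD j.toNat 0 else 0)
  if skip ≤ takeRev then (dp ++ [takeRev], tk ++ [true]) else (dp ++ [skip], tk ++ [false])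

-- Source B's `while i >= 0` loop, ported with fuel n: exact for d ≥ 0, where i strictly decreases
-- each iteration so at most n iterations run (for d < 0, outside Pre_, the Python loop diverges).
def pvRecon (d : Int) (tk : List Bool) : Nat → Int → List Int → List Int
  | 0, _, acc => acc
  | fuel + 1, i, acc =>
    if 0 ≤ i then
      if tk.getD i.toNat false then pvRecon d tk fuel (i - d - 1) (acc ++ [i + 1])
      else pvRecon d tk fuel (i - 1) acc
    else acc

def restaurantFinder_alt (d : Int) (site_list : List Int) : Int × List Int :=
  let n := site_list.length
  let st := (List.range n).foldl (pvStepB d site_list) ([], [])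
  let sites := pvRecon d st.2 n ((n : Int) - 1) []
  (st.1.getD (n - 1) 0, sites.reverse)

-- ===== PRECONDITION & SPEC =====
-- Pre_ excludes the empty site_list, on which A raises IndexError (max_revenue[-1]), and
-- negative d, outside the natural domain: for d ≤ -2 A raises IndexError, and for d = -1 A
-- returns a value read from not-yet-computed DP cells while B's reconstruction loop diverges.
def Pre_restaurantFinder (d : Int) (site_list : List Int) : Prop :=
  0 ≤ d ∧ site_list ≠ []
instance (d : Int) (site_list : List Int) : Decidable (Pre_restaurantFinder d site_list) := by
  unfold Pre_restaurantFinder; infer_instance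

def pvWitness_restaurantFinder : Int × List Int := (1, [3, 10, 4, 7])

def Spec_restaurantFinder (d : Int) (site_list : List Int) (out : Int × List Int) : Prop := out = restaurantFinder_alt d site_list
instance (d : Int) (site_list : List Int) (out : Int × List Int) : Decidable (Spec_restaurantFinder d site_list out) := by unfold Spec_restaurantFinder; infer_instance

-- ===== CLAIM (what is proved, stated in full; the proofs are below) =====
def Claim_equal_restaurantFinder : Prop := ∀ (d : Int) (site_list : List Int), Dom_restaurantFinder d site_list → Pre_restaurantFinder d site_list → Spec_restaurantFinder d site_list (restaurantFinder d site_list)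

-- ===== LEMMAS AND PROOFS =====

-- the common DP value at index i (A's max_revenue[i] = B's dp[i]), for d = (d' : Int) ≥ 0
def mrSpec (d' : Nat) (s : List Int) (i : Nat) : Int :=
  let c1 : Int := if _h : i = 0 then 0 else mrSpec d' s (i - 1)
  let c2 : Int := s.getD i 0 + (if _h : d' + 1 ≤ i then mrSpec d' s (i - d' - 1) else 0)
  if c2 < c1 then c1 else c2
termination_by i
decreasing_by all_goals omega

-- B's back-pointer at index i
def tkSpec (d' : Nat) (s : List Int) (i : Nat) : Bool :=
  let c1 : Int := if i = 0 then 0 else mrSpec d' s (i - 1)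
  let c2 : Int := s.getD i 0 + (if d' + 1 ≤ i then mrSpec d' s (i - d' - 1) else 0)
  decide (c1 ≤ c2)

-- A's selected list at index i
def ssSpec (d' : Nat) (s : List Int) (i : Nat) : List Int :=
  if tkSpec d' s i then
    (if _h : d' + 1 ≤ i then ssSpec d' s (i - d' - 1) else []) ++ [(i : Int) + 1]
  else
    if _h : i = 0 then [] else ssSpec d' s (i - 1)
termination_by i
decreasing_by all_goals omega

-- B's reconstruction output starting at index i (sites in decreasing order)
def rsSpec (d' : Nat) (s : List Int) (i : Nat) : List Int :=
  if tkSpec d' s i then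
    ((i : Int) + 1) :: (if _h : d' + 1 ≤ i then rsSpec d' s (i - d' - 1) else [])
  else
    if _h : i = 0 then [] else rsSpec d' s (i - 1)
termination_by i
decreasing_by all_goals omega

theorem getD_map_range {α : Type} (f : Nat → α) (n k : Nat) (hk : k < n) (dflt : α) :
    ((List.range n).map f).getD k dflt = f k := by
  rw [List.getD_eq_getElem?_getD]
  simp [hk]

theorem foldA (d' : Nat) (s : List Int) (n : Nat) :
    (List.range n).foldl (pvStepA (d' : Int) s) ([], []) =
      ((List.range n).map (mrSpec d' s), (List.range n).map (ssSpec d' s)) := by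
  induction n with
  | zero => simp
  | succ n ih =>
    rw [List.range_succ, List.foldl_append, ih]
    simp only [List.foldl_cons, List.foldl_nil, List.map_append, List.map_cons,
      List.map_nil]
    have hjt : ((n : Int) - (d' : Int) - 1).toNat = n - d' - 1 := by omega
    have e1 : (if 0 ≤ (n : Int) - (d' : Int) - 1 then
          s.getD n 0 + ((List.range n).map (mrSpec d' s)).getD ((n : Int) - (d' : Int) - 1).toNat 0
          else s.getD n 0) =
        s.getD n 0 + (if d' + 1 ≤ n then mrSpec d' s (n - d' - 1) else 0) := by
      by_cases hle : d' + 1 ≤ n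
      · rw [if_pos (by omega), if_pos hle, hjt, getD_map_range _ _ _ (by omega)]
      · rw [if_neg (by omega), if_neg hle, add_zero]
    have e2 : (if 0 ≤ (n : Int) - (d' : Int) - 1 then
          ((List.range n).map (ssSpec d' s)).getD ((n : Int) - (d' : Int) - 1).toNat [] ++
            [(n : Int) + 1]
          else [(n : Int) + 1]) =
        (if d' + 1 ≤ n then ssSpec d' s (n - d' - 1) else []) ++ [(n : Int) + 1] := by
      by_cases hle : d' + 1 ≤ n
      · rw [if_pos (by omega), if_pos hle, hjt, getD_map_range _ _ _ (by omega)]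
      · rw [if_neg (by omega), if_neg hle, List.nil_append]
    have e3 : (if n = 0 then (0 : Int) else ((List.range n).map (mrSpec d' s)).getD (n - 1) 0) =
        (if n = 0 then (0 : Int) else mrSpec d' s (n - 1)) := by
      by_cases h0 : n = 0
      · simp [h0]
      · rw [if_neg h0, if_neg h0, getD_map_range _ _ _ (by omega)]
    have e4 : (if n = 0 then ([] : List Int)
          else ((List.range n).map (ssSpec d' s)).getD (n - 1) []) =
        (if n = 0 then ([] : List Int) else ssSpec d' s (n - 1)) := by
      by_cases h0 : n = 0
      · simp [h0]
      · rw [if_neg h0, if_neg h0, getD_map_range _ _ _ (by omega)]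
    unfold pvStepA
    simp only [e1, e2, e3, e4]
    conv_rhs => rw [mrSpec, ssSpec]
    simp only [tkSpec, dite_eq_ite]
    set c1 : Int := if n = 0 then (0 : Int) else mrSpec d' s (n - 1) with hc1
    set c2 : Int := s.getD n 0 + (if d' + 1 ≤ n then mrSpec d' s (n - d' - 1) else 0) with hc2
    set l1 : List Int := if n = 0 then ([] : List Int) else ssSpec d' s (n - 1) with hl1
    set l2 : List Int := (if d' + 1 ≤ n then ssSpec d' s (n - d' - 1) else []) ++ [(n : Int) + 1]
      with hl2
    by_cases hc : c2 < c1
    · rw [if_pos hc, if_pos hc, if_neg (by simpa using not_le.mpr hc)]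
    · rw [if_neg hc, if_neg hc, if_pos (by simpa using not_lt.mp hc)]

theorem foldB (d' : Nat) (s : List Int) (n : Nat) :
    (List.range n).foldl (pvStepB (d' : Int) s) ([], []) =
      ((List.range n).map (mrSpec d' s), (List.range n).map (tkSpec d' s)) := by
  induction n with
  | zero => simp
  | succ n ih =>
    rw [List.range_succ, List.foldl_append, ih]
    simp only [List.foldl_cons, List.foldl_nil, List.map_append, List.map_cons,
      List.map_nil]
    have hjt : ((n : Int) - (d' : Int) - 1).toNat = n - d' - 1 := by omega
    have e1 : (if 0 < n then ((List.range n).map (mrSpec d' s)).getD (n - 1) 0 else 0) =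
        (if n = 0 then (0 : Int) else mrSpec d' s (n - 1)) := by
      by_cases h0 : n = 0
      · simp [h0]
      · rw [if_pos (by omega), if_neg h0, getD_map_range _ _ _ (by omega)]
    have e2 : s.getD n 0 + (if 0 ≤ (n : Int) - (d' : Int) - 1 then
          ((List.range n).map (mrSpec d' s)).getD ((n : Int) - (d' : Int) - 1).toNat 0 else 0) =
        s.getD n 0 + (if d' + 1 ≤ n then mrSpec d' s (n - d' - 1) else 0) := by
      by_cases hle : d' + 1 ≤ n
      · rw [if_pos (by omega), if_pos hle, hjt, getD_map_range _ _ _ (by omega)]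
      · rw [if_neg (by omega), if_neg hle]
    unfold pvStepB
    simp only [e1, e2]
    conv_rhs => rw [mrSpec]
    simp only [tkSpec, dite_eq_ite]
    set c1 : Int := if n = 0 then (0 : Int) else mrSpec d' s (n - 1) with hc1
    set c2 : Int := s.getD n 0 + (if d' + 1 ≤ n then mrSpec d' s (n - d' - 1) else 0) with hc2
    by_cases hc : c1 ≤ c2
    · rw [if_pos hc, if_neg (not_lt.mpr hc)]
      simp [hc]
    · rw [if_neg hc, if_pos (not_le.mp hc)]
      simp [hc]

theorem ss_eq_rs_reverse (d' : Nat) (s : List Int) (i : Nat) :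
    ssSpec d' s i = (rsSpec d' s i).reverse := by
  induction i using Nat.strong_induction_on with
  | _ i ih =>
    rw [ssSpec, rsSpec]
    by_cases ht : tkSpec d' s i
    · rw [if_pos ht, if_pos ht]
      by_cases hle : d' + 1 ≤ i
      · rw [dif_pos hle, dif_pos hle, ih _ (by omega)]
        simp
      · rw [dif_neg hle, dif_neg hle]; simp
    · rw [if_neg ht, if_neg ht]
      by_cases h0 : i = 0
      · rw [dif_pos h0, dif_pos h0]; simp
      · rw [dif_neg h0, dif_neg h0, ih _ (by omega)]

theorem pvRecon_neg (d : Int) (tk : List Bool) (fuel : Nat) (i : Int) (acc : List Int)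
    (hi : i < 0) : pvRecon d tk fuel i acc = acc := by
  cases fuel with
  | zero => rfl
  | succ f => rw [pvRecon, if_neg (by omega)]

theorem recon_eq (d' : Nat) (s : List Int) (n : Nat) (i : Nat) (hi : i < n) :
    ∀ fuel acc, i + 1 ≤ fuel →
      pvRecon (d' : Int) ((List.range n).map (tkSpec d' s)) fuel (i : Int) acc =
        acc ++ rsSpec d' s i := by
  induction i using Nat.strong_induction_on with
  | _ i ih =>
    intro fuel acc hfuel
    obtain ⟨f, rfl⟩ : ∃ f, fuel = f + 1 := ⟨fuel - 1, by omega⟩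
    rw [pvRecon, if_pos (by omega)]
    have htk : ((List.range n).map (tkSpec d' s)).getD ((i : Int)).toNat false = tkSpec d' s i := by
      rw [Int.toNat_natCast, getD_map_range _ _ _ hi]
    rw [htk, rsSpec]
    by_cases ht : tkSpec d' s i
    · rw [if_pos ht, if_pos ht]
      by_cases hle : d' + 1 ≤ i
      · rw [dif_pos hle]
        have hcast : (i : Int) - (d' : Int) - 1 = ((i - d' - 1 : Nat) : Int) := by omega
        rw [hcast, ih _ (by omega) (by omega) _ _ (by omega)]
        simp
      · rw [dif_neg hle, pvRecon_neg _ _ _ _ _ (by omega)]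
    · rw [if_neg ht, if_neg ht]
      by_cases h0 : i = 0
      · subst h0
        rw [dif_pos rfl, pvRecon_neg _ _ _ _ _ (by norm_num)]
        simp
      · rw [dif_neg h0]
        have hcast : (i : Int) - 1 = ((i - 1 : Nat) : Int) := by omega
        rw [hcast, ih _ (by omega) (by omega) _ _ (by omega)]

-- ===== VERDICT (by name: the statement is the Claim_ definition above) =====
theorem restaurantFinder_spec : Claim_equal_restaurantFinder := by
  intro d s _hdom hpre
  obtain ⟨hd, hne⟩ := hpre
  obtain ⟨d', rfl⟩ : ∃ d' : Nat, d = (d' : Int) := ⟨d.toNat, (Int.toNat_of_nonneg hd).symm⟩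
  have hn : 1 ≤ s.length := by
    cases s with
    | nil => exact absurd rfl hne
    | cons a t => simp
  unfold Spec_restaurantFinder restaurantFinder restaurantFinder_alt
  simp only [foldA, foldB]
  rw [getD_map_range _ _ _ (by omega), getD_map_range _ _ _ (by omega)]
  have hcast : (s.length : Int) - 1 = ((s.length - 1 : Nat) : Int) := by omega
  rw [hcast, recon_eq d' s s.length (s.length - 1) (by omega) s.length [] (by omega)]
  rw [List.nil_append, ← ss_eq_rs_reverse]
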